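-- pv_equiv track=rewrite | github.com/exul/semesterarbeit | euler_tour.py | merge_cycles
-- ===== SOURCE A (Python) =====
-- def merge_cycles(euler, euler_sub, current_node):
--     '''
--     Merge two eulerian cycles.
--
--     @type:  euler:list
--     @param: List that contains the eulerian path.
--     @type:  euler_sub:list
--     @param: List that should be merged into eulerian path.
--     @type:  current_node: node
--     @param: Node at which the two lists should be murged
--
--     @rtype: list
--     @return: A list containing all nodes.
--     '''
--     # copy content of euler list to euler_tmp
--     euler_tmp = list()
--     euler_tmp += euler
--     # empty euler list
--     euler = list()
--     # only append list once
--     found = False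
--
--     if len(euler_tmp) > 0:
--         for node in euler_tmp:
--             if node == current_node and found == False:
--                 for node_sub in euler_sub:
--                     euler.append(node_sub)
--                 found = True
--             else:
--                 euler.append(node)
--     else:
--         euler += euler_sub
--
--     return euler
-- ===== SOURCE B (Python) =====
-- def merge_cycles(euler, euler_sub, current_node):
--     if not euler:
--         return list(euler_sub)
--     try:
--         i = euler.index(current_node)
--     except ValueError:
--         return list(euler)
--     return list(euler[:i]) + list(euler_sub) + list(euler[i+1:])
-- ===== Notes on version B (the rewrite author's own statement) =====
-- stated objective: simpler
-- what changed: Replaces the element-by-element rebuild loop with a found flag by a single index lookup of the splice point and slice concatenation euler[:i] + euler_sub + euler[i+1:].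
import Mathlib
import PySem

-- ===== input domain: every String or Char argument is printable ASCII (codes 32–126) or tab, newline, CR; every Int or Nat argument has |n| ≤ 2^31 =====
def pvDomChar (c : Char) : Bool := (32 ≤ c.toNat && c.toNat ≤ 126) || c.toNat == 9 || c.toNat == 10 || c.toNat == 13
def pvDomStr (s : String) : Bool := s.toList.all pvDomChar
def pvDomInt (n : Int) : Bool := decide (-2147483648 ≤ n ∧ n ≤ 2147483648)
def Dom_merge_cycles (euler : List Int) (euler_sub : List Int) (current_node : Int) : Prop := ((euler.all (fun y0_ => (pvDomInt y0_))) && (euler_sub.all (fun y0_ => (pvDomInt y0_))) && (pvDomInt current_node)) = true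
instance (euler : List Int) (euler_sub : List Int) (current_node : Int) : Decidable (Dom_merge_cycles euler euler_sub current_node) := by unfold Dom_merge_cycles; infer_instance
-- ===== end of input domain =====

-- B replaces A's element-by-element rebuild loop with a found flag by one index
-- lookup of the splice point plus slice concatenation (objective: simpler).


-- ===== PORT A =====
def merge_cycles (euler : List Int) (euler_sub : List Int) (current_node : Int) : List Int :=
  -- euler_tmp = list(); euler_tmp += euler
  let euler_tmp : List Int := [] ++ euler
  -- euler = list(); found = False
  if euler_tmp.length > 0 then
    -- for node in euler_tmp: …
    (euler_tmp.foldl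
      (fun (st : List Int × Bool) node =>
        if node = current_node ∧ st.2 = false then
          -- for node_sub in euler_sub: euler.append(node_sub); found = True
          (st.1 ++ euler_sub, true)
        else
          (st.1 ++ [node], st.2))
      (([] : List Int), false)).1
  else
    ([] : List Int) ++ euler_sub

-- ===== PORT B =====
def merge_cycles_alt (euler : List Int) (euler_sub : List Int) (current_node : Int) : List Int :=
  if euler = [] then euler_sub
  else
    match PySem.List.index? euler current_node with
    | none => euler
    | some i => PySem.List.slice euler none (some (i : Int)) ++ euler_sub
                  ++ PySem.List.slice euler (some ((i : Int) + 1)) none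

-- ===== PRECONDITION & SPEC =====
def Spec_merge_cycles (euler : List Int) (euler_sub : List Int) (current_node : Int) (out : List Int) : Prop := out = merge_cycles_alt euler euler_sub current_node
instance (euler : List Int) (euler_sub : List Int) (current_node : Int) (out : List Int) : Decidable (Spec_merge_cycles euler euler_sub current_node out) := by unfold Spec_merge_cycles; infer_instance

-- ===== CLAIM (what is proved, stated in full; the proofs are below) =====
def Claim_equal_merge_cycles : Prop := ∀ (euler : List Int) (euler_sub : List Int) (current_node : Int), Dom_merge_cycles euler euler_sub current_node → Spec_merge_cycles euler euler_sub current_node (merge_cycles euler euler_sub current_node)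

-- ===== LEMMAS AND PROOFS =====

-- B's splice expressed over take/drop (what the slice lemmas reduce it to)
def spliceCore (euler : List Int) (euler_sub : List Int) (current_node : Int) : List Int :=
  match PySem.List.index? euler current_node with
  | none => euler
  | some i => euler.take i ++ euler_sub ++ euler.drop (i + 1)

-- once found = true, A's loop just appends the rest
theorem foldl_found_true (sub : List Int) (v : Int) :
    ∀ (xs acc : List Int),
      xs.foldl (fun (st : List Int × Bool) node =>
          if node = v ∧ st.2 = false then (st.1 ++ sub, true)
          else (st.1 ++ [node], st.2)) (acc, true) = (acc ++ xs, true) := by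
  intro xs
  induction xs with
  | nil => simp
  | cons x t ih => intro acc; simp [ih]

-- with found = false, A's loop computes the splice at the first occurrence
theorem foldl_found_false (sub : List Int) (v : Int) :
    ∀ (xs acc : List Int),
      (xs.foldl (fun (st : List Int × Bool) node =>
          if node = v ∧ st.2 = false then (st.1 ++ sub, true)
          else (st.1 ++ [node], st.2)) (acc, false)).1
        = acc ++ spliceCore xs sub v := by
  intro xs
  induction xs with
  | nil => simp [spliceCore, PySem.List.index?]
  | cons x t ih =>
    intro acc
    by_cases hx : x = v
    · subst hx
      rw [List.foldl_cons, if_pos (⟨rfl, rfl⟩ : x = x ∧ false = false),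
        foldl_found_true sub x t (acc ++ sub)]
      have h0 : PySem.List.index? (x :: t) x = some 0 :=
        PySem.List.index?_cons_self x t
      simp only [spliceCore, h0, List.take_zero, List.drop_succ_cons,
        List.drop_zero, List.nil_append, List.append_assoc]
    · have hne : ¬ (x = v ∧ false = false) := fun h => hx h.1
      rw [List.foldl_cons, if_neg hne, ih (acc ++ [x])]
      have hidx : PySem.List.index? (x :: t) v = (PySem.List.index? t v).map (· + 1) :=
        PySem.List.index?_cons_of_ne t hx
      simp only [spliceCore, hidx]
      cases h : PySem.List.index? t v with
      | none => simp
      | some i => simp [List.take_succ_cons, List.drop_succ_cons]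

theorem merge_cycles_spec : Claim_equal_merge_cycles := by
  intro euler euler_sub current_node _
  unfold Spec_merge_cycles merge_cycles merge_cycles_alt
  cases euler with
  | nil => simp
  | cons x t =>
    simp only [List.nil_append, List.length_cons, if_pos (Nat.succ_pos _), reduceCtorEq]
    rw [foldl_found_false euler_sub current_node (x :: t) []]
    rw [List.nil_append, spliceCore]
    cases h : PySem.List.index? (x :: t) current_node with
    | none => rfl
    | some i =>
      have h1 : PySem.List.slice (x :: t) none (some (i : Int)) = (x :: t).take i :=
        PySem.List.slice_to_natCast (x :: t) i
      have h2 : PySem.List.slice (x :: t) (some ((i : Int) + 1)) none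
          = (x :: t).drop (i + 1) := by
        have h := PySem.List.slice_from_natCast (x :: t) (i + 1)
        push_cast at h
        exact h
      simp [h1, h2]

-- ===== VERDICT (by name: the statement is the Claim_ definition above) =====
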